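-- pv_equiv track=rewrite | github.com/gymreklab/1000Genomes-TR-Analysis | stats/dbsnp/dbsnp_overlap.py | is_pure_repeats
-- ===== SOURCE A (Python) =====
-- def is_pure_repeats(seq, repeat_unit):
--     slen = len(seq)
--     rlen = len(repeat_unit)
--     for start_idx in range(rlen):
--         pure = True
--         for seq_idx in range(slen):
--             if seq[seq_idx] != repeat_unit[(seq_idx + start_idx) % rlen]:
--                 pure = False
--                 break
--         if pure:
--             return True
--     return False
-- ===== SOURCE B (Python) =====
-- def is_pure_repeats(seq, repeat_unit):
--     rlen = len(repeat_unit)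
--     if rlen == 0:
--         return False
--     return seq in repeat_unit * (len(seq) // rlen + 2)
-- ===== Notes on version B (the rewrite author's own statement) =====
-- stated objective: faster
-- what changed: Replaces the nested character-by-character scan over all rotations with a single substring search of seq inside repeat_unit tiled enough times to cover every rotation.
import Mathlib
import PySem

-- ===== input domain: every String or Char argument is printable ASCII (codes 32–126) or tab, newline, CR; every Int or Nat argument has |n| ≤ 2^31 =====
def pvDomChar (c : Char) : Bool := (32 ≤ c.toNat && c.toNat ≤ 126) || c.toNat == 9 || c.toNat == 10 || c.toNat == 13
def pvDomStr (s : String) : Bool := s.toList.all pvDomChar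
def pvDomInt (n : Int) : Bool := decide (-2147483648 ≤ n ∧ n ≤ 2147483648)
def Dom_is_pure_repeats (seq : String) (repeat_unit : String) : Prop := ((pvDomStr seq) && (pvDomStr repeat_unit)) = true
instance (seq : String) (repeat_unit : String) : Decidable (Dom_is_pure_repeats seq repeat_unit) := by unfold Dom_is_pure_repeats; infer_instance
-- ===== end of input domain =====

-- B replaces A's nested scan over all rotations by one substring search of seq
-- in repeat_unit tiled len(seq)//len(repeat_unit)+2 times (objective: faster).


-- ===== PORT A =====
-- inner loop: 'for seq_idx in range(slen): if seq[seq_idx] != repeat_unit[(seq_idx+start_idx)%rlen]: pure=False; break'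
-- (both indexings are always in range when the loop runs, so getD is exact here)
def pvAInner (s r : List Char) (rlen start_idx : Nat) : List Nat → Bool
  | [] => true
  | i :: rest =>
    if s.getD i ' ' ≠ r.getD ((i + start_idx) % rlen) ' ' then false
    else pvAInner s r rlen start_idx rest

-- outer loop: 'for start_idx in range(rlen): … if pure: return True' then 'return False'
def pvAOuter (s r : List Char) (slen rlen : Nat) : List Nat → Bool
  | [] => false
  | st :: rest =>
    if pvAInner s r rlen st (List.range slen) then true
    else pvAOuter s r slen rlen rest

def is_pure_repeats (seq : String) (repeat_unit : String) : Bool :=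
  let s := seq.toList
  let r := repeat_unit.toList
  let slen := s.length
  let rlen := r.length
  pvAOuter s r slen rlen (List.range rlen)

-- ===== PORT B =====
def is_pure_repeats_alt (seq : String) (repeat_unit : String) : Bool :=
  let r := repeat_unit.toList
  let rlen := r.length
  if rlen = 0 then false
  else
    let s := seq.toList
    -- 'seq in repeat_unit * (len(seq) // rlen + 2)'
    PySem.Chars.isIn s (PySem.List.pyRepeat r ((s.length / rlen + 2 : Nat) : Int))

-- ===== PRECONDITION & SPEC =====
def Spec_is_pure_repeats (seq : String) (repeat_unit : String) (out : Bool) : Prop := out = is_pure_repeats_alt seq repeat_unit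
instance (seq : String) (repeat_unit : String) (out : Bool) : Decidable (Spec_is_pure_repeats seq repeat_unit out) := by unfold Spec_is_pure_repeats; infer_instance

-- ===== CLAIM (what is proved, stated in full; the proofs are below) =====
def Claim_equal_is_pure_repeats : Prop := ∀ (seq : String) (repeat_unit : String), Dom_is_pure_repeats seq repeat_unit → Spec_is_pure_repeats seq repeat_unit (is_pure_repeats seq repeat_unit)

-- ===== LEMMAS AND PROOFS =====

theorem pvAInner_eq_all (s r : List Char) (rlen st : Nat) (l : List Nat) :
    pvAInner s r rlen st l = l.all (fun i => decide (s.getD i ' ' = r.getD ((i + st) % rlen) ' ')) := by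
  induction l with
  | nil => rfl
  | cons i rest ih =>
    simp [pvAInner, ih]

theorem pvAOuter_eq_any (s r : List Char) (slen rlen : Nat) (l : List Nat) :
    pvAOuter s r slen rlen l = l.any (fun st => pvAInner s r rlen st (List.range slen)) := by
  induction l with
  | nil => rfl
  | cons st rest ih =>
    by_cases h : pvAInner s r rlen st (List.range slen) = true <;>
      simp [pvAOuter, h, ih]

-- the tiled list agrees with r read cyclically
theorem tile_getD (r : List Char) (d : Char) :
    ∀ (k j : Nat), j < k * r.length →
      ((List.replicate k r).flatten).getD j d = r.getD (j % r.length) d := by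
  intro k
  induction k with
  | zero => intro j hj; simp at hj
  | succ k ih =>
    intro j hj
    rw [List.replicate_succ, List.flatten_cons]
    rcases lt_or_ge j r.length with h | h
    · rw [List.getD_append _ _ _ _ h, Nat.mod_eq_of_lt h]
    · rw [List.getD_append_right _ _ _ _ h]
      have e1 : (k + 1) * r.length = k * r.length + r.length := by ring
      have hlt : j - r.length < k * r.length := by omega
      rw [ih _ hlt]
      congr 1
      conv_rhs => rw [show j = (j - r.length) + r.length by omega]
      rw [Nat.add_mod_right]

theorem tile_length (r : List Char) (k : Nat) :
    ((List.replicate k r).flatten).length = k * r.length := by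
  simp [List.length_flatten, List.map_replicate, List.sum_replicate, smul_eq_mul]

-- A = true iff some rotation start matches every position of s
theorem portA_iff (seq repeat_unit : String) :
    is_pure_repeats seq repeat_unit = true ↔
      ∃ st < repeat_unit.toList.length, ∀ i < seq.toList.length,
        seq.toList.getD i ' ' = repeat_unit.toList.getD ((i + st) % repeat_unit.toList.length) ' ' := by
  simp only [is_pure_repeats, pvAOuter_eq_any, pvAInner_eq_all, List.any_eq_true,
    List.all_eq_true, List.mem_range, decide_eq_true_eq]

-- core: rotation match iff s is a prefix of some suffix of the tiled unit
theorem core_iff (s r : List Char) (hrpos : 0 < r.length) :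
    (∃ st < r.length, ∀ i < s.length, s.getD i ' ' = r.getD ((i + st) % r.length) ' ') ↔
    ∃ j, s <+: ((List.replicate (s.length / r.length + 2) r).flatten).drop j := by
  have hbl := tile_length r (s.length / r.length + 2)
  have hq := Nat.div_add_mod s.length r.length
  have hm := Nat.mod_lt s.length hrpos
  have e2 : (s.length / r.length + 2) * r.length
      = r.length * (s.length / r.length) + 2 * r.length := by ring
  constructor
  · rintro ⟨st, hst, hmatch⟩
    refine ⟨st, ?_⟩
    rw [List.prefix_iff_eq_take]
    refine List.ext_getElem ?_ ?_
    · simp only [List.length_take, List.length_drop, hbl]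
      omega
    · intro i h1 h2
      have hi : i < s.length := h1
      have hidx : st + i < ((List.replicate (s.length / r.length + 2) r).flatten).length := by
        rw [hbl]; omega
      rw [List.getElem_take, List.getElem_drop]
      have h5 := hmatch i hi
      rw [List.getD_eq_getElem s ' ' hi] at h5
      rw [h5, ← List.getD_eq_getElem _ ' ' hidx,
        tile_getD r ' ' _ (st + i) (by rw [hbl] at hidx; exact hidx),
        Nat.add_comm st i]
  · rintro ⟨j, hpre⟩
    rcases Nat.eq_zero_or_pos s.length with hz | hpos
    · exact ⟨0, hrpos, fun i hi => absurd hi (by omega)⟩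
    · have hlen := hpre.length_le
      rw [List.length_drop, hbl] at hlen
      have heq := List.prefix_iff_eq_take.mp hpre
      refine ⟨j % r.length, Nat.mod_lt j hrpos, ?_⟩
      intro i hi
      have hidx : j + i < ((List.replicate (s.length / r.length + 2) r).flatten).length := by
        rw [hbl]; omega
      have h2 : i < ((((List.replicate (s.length / r.length + 2) r).flatten).drop j).take s.length).length := by
        simp only [List.length_take, List.length_drop, hbl]
        omega
      have h3 := List.getElem_of_eq heq hi
      rw [List.getElem_take, List.getElem_drop] at h3
      rw [List.getD_eq_getElem s ' ' hi, h3, ← List.getD_eq_getElem _ ' ' hidx,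
        tile_getD r ' ' _ (j + i) (by rw [hbl] at hidx; exact hidx)]
      congr 1
      rw [Nat.add_mod_mod, Nat.add_comm i j]

theorem main_eq (seq repeat_unit : String) :
    is_pure_repeats seq repeat_unit = is_pure_repeats_alt seq repeat_unit := by
  by_cases h0 : repeat_unit.toList.length = 0
  · simp [is_pure_repeats, is_pure_repeats_alt, h0, pvAOuter]
  · have hrpos : 0 < repeat_unit.toList.length := Nat.pos_of_ne_zero h0
    have hB : is_pure_repeats_alt seq repeat_unit
        = PySem.Chars.isIn seq.toList
            ((List.replicate (seq.toList.length / repeat_unit.toList.length + 2)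
              repeat_unit.toList).flatten) := by
      simp only [is_pure_repeats_alt]
      rw [if_neg h0]
      simp only [PySem.List.pyRepeat, Int.toNat_natCast]
    rw [Bool.eq_iff_iff, portA_iff, hB, ← PySem.Chars.exists_prefix_drop_iff_isIn]
    exact core_iff seq.toList repeat_unit.toList hrpos

-- ===== VERDICT (by name: the statement is the Claim_ definition above) =====
theorem is_pure_repeats_spec : Claim_equal_is_pure_repeats := by
  intro seq repeat_unit _
  exact main_eq seq repeat_unit
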